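-- pv_equiv track=rewrite | github.com/generalaimodels/DSA | test/test2.py | floyd_warshall_all_pairs
-- ===== SOURCE A (Python) =====
-- from typing import Dict, List, Union, Optional, Tuple, Set, Deque
--
-- def floyd_warshall_all_pairs(graph: Dict[int, Dict[int, int]]) -> Dict[Tuple[int, int], int]:
--     nodes = set()
--     for u in graph:
--         nodes.add(u)
--         for v in graph[u]:
--             nodes.add(v)
--
--     dist = {}
--     for i in nodes:
--         for j in nodes:
--             if i == j:
--                 dist[(i, j)] = 0
--             elif j in graph.get(i, {}):
--                 dist[(i, j)] = graph[i][j]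
--             else:
--                 dist[(i, j)] = float('inf')
--
--     for k in nodes:
--         for i in nodes:
--             for j in nodes:
--                 dist[(i, j)] = min(dist[(i, j)], dist[(i, k)] + dist[(k, j)])
--
--     return {k: v for k, v in dist.items() if v != float('inf')}
-- ===== SOURCE B (Python) =====
-- def floyd_warshall_all_pairs(graph):
--     # collect the vertices in first-seen order
--     nodes = []
--     seen = set()
--     for u, adj in graph.items():
--         if u not in seen:
--             seen.add(u)
--             nodes.append(u)
--         for v in adj:
--             if v not in seen:
--                 seen.add(v)
--                 nodes.append(v)
--     n = len(nodes)
--     # one-step cost matrix (None = no edge; self-loop entries are never used)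
--     wt = [[None if i == j else graph.get(nodes[i], {}).get(nodes[j])
--            for j in range(n)] for i in range(n)]
--     dist = [[0 if i == j else wt[i][j] for j in range(n)] for i in range(n)]
--     # repeated (min,+) relaxation rounds: extend every known walk by one leading
--     # edge per round, until a fixpoint (no negative cycles => <= n rounds suffice)
--     for _ in range(n):
--         new = [row[:] for row in dist]
--         for i in range(n):
--             for j in range(n):
--                 a = wt[i][j]
--                 if a is not None:
--                     row_j = dist[j]
--                     for t in range(n):
--                         b = row_j[t]
--                         if b is not None:
--                             c = a + b
--                             cur = new[i][t]
--                             if cur is None or c < cur: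
--                                 new[i][t] = c
--         if new == dist:
--             break
--         dist = new
--     return {(nodes[i], nodes[j]): dist[i][j]
--             for i in range(n) for j in range(n) if dist[i][j] is not None}
-- ===== Notes on version B (the rewrite author's own statement) =====
-- stated objective: alternative
-- what changed: Replaces Floyd-Warshall's in-place pivot-vertex triple loop over a tuple-keyed dict by a different algorithm: repeated (min,+) relaxation rounds (all-pairs Bellman-Ford / min-plus matrix iteration) on an index matrix, extending every known walk by one leading edge per Jacobi round and stopping at the first fixpoint.
import Mathlib
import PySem

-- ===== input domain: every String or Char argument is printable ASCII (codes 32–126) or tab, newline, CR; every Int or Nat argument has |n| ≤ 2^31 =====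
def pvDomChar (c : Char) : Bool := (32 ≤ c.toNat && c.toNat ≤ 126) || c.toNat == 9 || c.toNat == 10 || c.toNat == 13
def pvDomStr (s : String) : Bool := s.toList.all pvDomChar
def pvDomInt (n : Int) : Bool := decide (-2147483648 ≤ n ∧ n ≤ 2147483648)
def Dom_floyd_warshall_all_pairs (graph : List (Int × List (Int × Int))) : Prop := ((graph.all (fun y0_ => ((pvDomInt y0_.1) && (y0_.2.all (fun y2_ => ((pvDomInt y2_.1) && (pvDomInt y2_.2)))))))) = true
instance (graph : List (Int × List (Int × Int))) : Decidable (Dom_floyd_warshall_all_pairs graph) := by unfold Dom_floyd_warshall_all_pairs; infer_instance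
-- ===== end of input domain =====

-- B replaces Floyd-Warshall's in-place pivot-vertex triple loop by a different algorithm:
-- repeated (min,+) relaxation rounds (all-pairs Bellman-Ford) extending every known walk by one
-- leading edge per round until a fixpoint, over an index matrix. Equivalence is about the return
-- value (neither mutates its argument).

-- ===== PORT A =====
-- Python's int-or-float('inf') distance values are modelled as Option Int, none = float('inf'):
-- pvOmin is Python's min on such values, pvOadd is +; both exact (inf absorbs +, inf is the maximum).
def pvOmin (x y : Option Int) : Option Int :=
  match x, y with
  | none, y => y
  | x, none => x
  | some a, some b => some (min a b)

def pvOadd (x y : Option Int) : Option Int :=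
  match x, y with
  | some a, some b => some (a + b)
  | _, _ => none

def floyd_warshall_all_pairs (graph : List (Int × List (Int × Int))) : List (Int × Int × Int) :=
  let g := PySem.Dict.ofList graph
  -- nodes = set(); for u in graph: nodes.add(u); for v in graph[u]: nodes.add(v)
  let nodes : PySem.Set Int := g.items.foldl
    (fun s p => ((PySem.Dict.ofList p.2).keys).foldl (fun s v => PySem.Set.add s v) (PySem.Set.add s p.1))
    PySem.Set.empty
  -- init dist
  let dist : PySem.Dict (Int × Int) (Option Int) := nodes.foldl
    (fun d i => nodes.foldl
      (fun d j =>
        if i = j then d.insert (i, j) (some 0)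
        else
          match (PySem.Dict.ofList (g.getD i [])).get? j with
          | some w => d.insert (i, j) (some w)
          | none => d.insert (i, j) none)
      d)
    PySem.Dict.empty
  -- triple relaxation loop
  let dist := nodes.foldl
    (fun d k => nodes.foldl
      (fun d i => nodes.foldl
        (fun d j =>
          d.insert (i, j) (pvOmin (d.getD (i, j) none) (pvOadd (d.getD (i, k) none) (d.getD (k, j) none))))
        d)
      d)
    dist
  -- {k: v for k, v in dist.items() if v != float('inf')}
  dist.items.filterMap (fun p =>
    match p.2 with
    | some w => some (p.1.1, p.1.2, w)
    | none => none)

-- ===== PORT B =====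
-- matrix accessors: m[i][j] read / write (m is a list of rows, None = unreachable)
def pvGetM (m : List (List (Option Int))) (i j : Nat) : Option Int := (m.getD i []).getD j none

def pvSetM (m : List (List (Option Int))) (i j : Nat) (v : Option Int) : List (List (Option Int)) :=
  m.set i ((m.getD i []).set j v)

-- one relaxation round of Source B: new[i][t] = min(dist[i][t], min over edges i->j of wt[i][j]+dist[j][t])
-- (Jacobi: candidates are read from the round's input matrix dist, accumulated into new)
def pvRound (wt : List (List (Option Int))) (n : Nat) (dist : List (List (Option Int))) :
    List (List (Option Int)) :=
  (List.range n).foldl (fun new i =>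
    (List.range n).foldl (fun new j =>
      match pvGetM wt i j with
      | none => new
      | some a =>
        (List.range n).foldl (fun new t =>
          match pvGetM dist j t with
          | none => new
          | some b =>
            match pvGetM new i t with
            | none => pvSetM new i t (some (a + b))
            | some cur => if a + b < cur then pvSetM new i t (some (a + b)) else new)
          new)
      new)
    dist

-- the 'for _ in range(n): ... if new == dist: break; dist = new' loop
def pvLoop (wt : List (List (Option Int))) (n : Nat) :
    Nat → List (List (Option Int)) → List (List (Option Int))
  | 0, dist => dist
  | fuel + 1, dist =>
    let new := pvRound wt n dist
    if new = dist then dist else pvLoop wt n fuel new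

def floyd_warshall_all_pairs_alt (graph : List (Int × List (Int × Int))) : List (Int × Int × Int) :=
  let g := PySem.Dict.ofList graph
  -- nodes = []; seen = set(); first-seen order
  let st := g.items.foldl
    (fun (st : PySem.Set Int × List Int) p =>
      let st := if PySem.Set.contains st.1 p.1 then st else (PySem.Set.add st.1 p.1, st.2 ++ [p.1])
      ((PySem.Dict.ofList p.2).keys).foldl
        (fun st v => if PySem.Set.contains st.1 v then st else (PySem.Set.add st.1 v, st.2 ++ [v])) st)
    (PySem.Set.empty, [])
  let nodes := st.2
  let n := nodes.length
  let wt : List (List (Option Int)) := (List.range n).map (fun i => (List.range n).map (fun j =>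
    if i = j then none
    else (PySem.Dict.ofList (g.getD (nodes.getD i 0) [])).get? (nodes.getD j 0)))
  let dist0 : List (List (Option Int)) := (List.range n).map (fun i => (List.range n).map (fun j =>
    if i = j then some 0 else pvGetM wt i j))
  let dist := pvLoop wt n n dist0
  (List.range n).flatMap (fun i => (List.range n).filterMap (fun j =>
    (pvGetM dist i j).map (fun w => (nodes.getD i 0, nodes.getD j 0, w))))

-- ===== PRECONDITION & SPEC =====
def pvPreNodes (graph : List (Int × List (Int × Int))) : List Int :=
  PySem.Set.ofList (graph.flatMap (fun p => p.1 :: p.2.map Prod.fst))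

-- directed edges (u, v, w) of the graph with self-loops dropped (A never reads them)
def pvPreEdges (graph : List (Int × List (Int × Int))) : List (Int × Int × Int) :=
  (PySem.Dict.ofList graph).items.flatMap (fun p =>
    (PySem.Dict.ofList p.2).items.filterMap (fun q =>
      if q.1 = p.1 then none else some (p.1, q.1, q.2)))

-- standard Bellman-Ford negative-cycle detection (all nodes start at potential 0;
-- after |nodes| relaxation rounds some edge still relaxes iff a negative cycle exists);
-- this is a decision procedure for the property named in Pre_, not the ports' algorithm.
def pvPreNoNegCycle (graph : List (Int × List (Int × Int))) : Bool :=
  let es := pvPreEdges graph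
  let relax := fun (d : PySem.Dict Int Int) =>
    es.foldl (fun d e =>
      if d.getD e.1 0 + e.2.2 < d.getD e.2.1 0 then d.insert e.2.1 (d.getD e.1 0 + e.2.2) else d) d
  let final := (pvPreNodes graph).foldl (fun d _ => relax d) PySem.Dict.empty
  es.all (fun e => decide (final.getD e.2.1 0 ≤ final.getD e.1 0 + e.2.2))

-- Pre_ excludes graphs containing a negative-weight cycle (through ≥ 2 nodes): on those inputs the
-- finite values A returns depend on CPython's set-of-int hash iteration order, an accident of A's
-- implementation that no reimplementation (nor the port) can be expected to reproduce.
def Pre_floyd_warshall_all_pairs (graph : List (Int × List (Int × Int))) : Prop :=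
  pvPreNoNegCycle graph = true
instance (graph : List (Int × List (Int × Int))) : Decidable (Pre_floyd_warshall_all_pairs graph) := by
  unfold Pre_floyd_warshall_all_pairs; infer_instance

def pvWitness_floyd_warshall_all_pairs : (List (Int × List (Int × Int))) := [(0, [(1, 3)]), (1, [(2, -1)])]

def Spec_floyd_warshall_all_pairs (graph : List (Int × List (Int × Int))) (out : List (Int × Int × Int)) : Prop := out = floyd_warshall_all_pairs_alt graph
instance (graph : List (Int × List (Int × Int))) (out : List (Int × Int × Int)) : Decidable (Spec_floyd_warshall_all_pairs graph out) := by unfold Spec_floyd_warshall_all_pairs; infer_instance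

-- ===== CLAIM (what is proved, stated in full; the proofs are below) =====
def Claim_equal_floyd_warshall_all_pairs : Prop := ∀ (graph : List (Int × List (Int × Int))), Dom_floyd_warshall_all_pairs graph → Pre_floyd_warshall_all_pairs graph → Spec_floyd_warshall_all_pairs graph (floyd_warshall_all_pairs graph)

-- ===== LEMMAS AND PROOFS =====

-- N as a map over its index range
theorem pv_map_range (N : List Int) :
    (List.range N.length).map (fun a => N.getD a 0) = N := by
  apply List.ext_getElem
  · simp
  · intro i h1 h2
    simp [List.getD_eq_getElem?_getD, List.getElem?_eq_getElem h2]

-- well-formedness of an n×n matrix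
def pvWf (n : Nat) (m : List (List (Option Int))) : Prop :=
  m.length = n ∧ ∀ r ∈ m, r.length = n

def pvKey (N : List Int) (i j : Nat) : Int × Int := (N.getD i 0, N.getD j 0)

-- the dict state corresponding to matrix m (row-major over index pairs)
def pvMkD (N : List Int) (m : List (List (Option Int))) : PySem.Dict (Int × Int) (Option Int) :=
  PySem.Dict.mk ((List.range N.length).flatMap (fun i =>
    (List.range N.length).map (fun j => (pvKey N i j, pvGetM m i j))))

-- one Floyd-Warshall relaxation on the matrix
def pvStep (m : List (List (Option Int))) (k i j : Nat) : List (List (Option Int)) :=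
  pvSetM m i j (pvOmin (pvGetM m i j) (pvOadd (pvGetM m i k) (pvGetM m k j)))

theorem pv_set_getD_self {α : Type} (l : List α) (j : Nat) (d : α) :
    l.set j (l.getD j d) = l := by
  by_cases hj : j < l.length
  · rw [List.getD_eq_getElem?_getD, List.getElem?_eq_getElem hj]
    exact List.set_getElem_self hj
  · exact List.set_eq_of_length_le (Nat.le_of_not_lt hj)

theorem pv_getD_set_ne {α : Type} (l : List α) {i j : Nat} (h : i ≠ j) (v : α) (d : α) :
    (l.set i v).getD j d = l.getD j d := by
  rw [List.getD_eq_getElem?_getD, List.getElem?_set_ne h, ← List.getD_eq_getElem?_getD]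

theorem pv_getD_set_self {α : Type} (l : List α) {i : Nat} (h : i < l.length) (v : α) (d : α) :
    (l.set i v).getD i d = v := by
  rw [List.getD_eq_getElem?_getD, List.getElem?_set_self h]
  rfl

theorem pvGetM_set_ne (m : List (List (Option Int))) {i j a b : Nat} (v : Option Int)
    (h : ¬(a = i ∧ b = j)) : pvGetM (pvSetM m i j v) a b = pvGetM m a b := by
  unfold pvSetM pvGetM
  by_cases hai : a = i
  · subst hai
    have hbj : b ≠ j := fun hb => h ⟨rfl, hb⟩
    by_cases hi : a < m.length
    · rw [pv_getD_set_self m hi, pv_getD_set_ne _ (fun hh => hbj hh.symm)]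
    · rw [List.set_eq_of_length_le (Nat.le_of_not_lt hi)]
  · rw [pv_getD_set_ne _ (fun hh => hai hh.symm)]

theorem pvGetM_set_self {n : Nat} {m : List (List (Option Int))} (hw : pvWf n m)
    {i j : Nat} (hi : i < n) (hj : j < n) (v : Option Int) :
    pvGetM (pvSetM m i j v) i j = v := by
  obtain ⟨hlen, hrows⟩ := hw
  have hi' : i < m.length := by omega
  have hrl : (m.getD i []).length = n := by
    rw [List.getD_eq_getElem?_getD, List.getElem?_eq_getElem hi']
    exact hrows _ (List.getElem_mem hi')
  unfold pvSetM pvGetM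
  rw [pv_getD_set_self m hi', pv_getD_set_self _ (by omega)]

theorem pvWf_set {n : Nat} {m : List (List (Option Int))} (hw : pvWf n m)
    (i j : Nat) (v : Option Int) : pvWf n (pvSetM m i j v) := by
  by_cases hi : i < m.length
  · obtain ⟨hlen, hrows⟩ := hw
    refine ⟨by simpa [pvSetM] using hlen, ?_⟩
    intro r hr
    rcases List.mem_or_eq_of_mem_set hr with hmem | heq
    · exact hrows _ hmem
    · subst heq
      rw [List.length_set, List.getD_eq_getElem?_getD, List.getElem?_eq_getElem hi]
      exact hrows _ (List.getElem_mem hi)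
  · unfold pvSetM
    rw [List.set_eq_of_length_le (Nat.le_of_not_lt hi)]
    exact hw

theorem pvKey_inj {N : List Int} (hN : N.Nodup) {i j a b : Nat}
    (hi : i < N.length) (hj : j < N.length) (ha : a < N.length) (hb : b < N.length)
    (h : pvKey N i j = pvKey N a b) : i = a ∧ j = b := by
  unfold pvKey at h
  obtain ⟨h1, h2⟩ := Prod.mk.injEq .. ▸ h
  rw [List.getD_eq_getElem?_getD, List.getElem?_eq_getElem hi,
      List.getD_eq_getElem?_getD, List.getElem?_eq_getElem ha] at h1
  rw [List.getD_eq_getElem?_getD, List.getElem?_eq_getElem hj,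
      List.getD_eq_getElem?_getD, List.getElem?_eq_getElem hb] at h2
  exact ⟨(hN.getElem_inj_iff).1 h1, (hN.getElem_inj_iff).1 h2⟩

theorem keys_pvMkD (N : List Int) (m : List (List (Option Int))) :
    (pvMkD N m).keys = (List.range N.length).flatMap (fun i =>
      (List.range N.length).map (fun j => pvKey N i j)) := by
  simp [pvMkD, PySem.Dict.keys, List.map_flatMap, Function.comp_def]

theorem nodup_keys_pvMkD {N : List Int} (hN : N.Nodup) (m : List (List (Option Int))) :
    (pvMkD N m).keys.Nodup := by
  rw [keys_pvMkD]
  have hprod : ((List.range N.length) ×ˢ (List.range N.length)).Nodup :=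
    List.Nodup.product List.nodup_range List.nodup_range
  have heq : ((List.range N.length) ×ˢ (List.range N.length)).map (fun p => pvKey N p.1 p.2)
      = (List.range N.length).flatMap (fun i => (List.range N.length).map (fun j => pvKey N i j)) := by
    simp [SProd.sprod, List.product, List.map_flatMap, List.map_map, Function.comp_def]
  rw [← heq]
  apply List.Nodup.map_on _ hprod
  rintro ⟨x1, x2⟩ hx ⟨y1, y2⟩ hy hf
  rw [List.mem_product] at hx hy
  simp only [List.mem_range] at hx hy
  obtain ⟨h1, h2⟩ := pvKey_inj hN hx.1 hx.2 hy.1 hy.2 hf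
  simp [h1, h2]

theorem mem_items_pvMkD (N : List Int) (m : List (List (Option Int))) {a b : Nat}
    (ha : a < N.length) (hb : b < N.length) :
    (pvKey N a b, pvGetM m a b) ∈ (pvMkD N m).items := by
  simp only [pvMkD, List.mem_flatMap, List.mem_map]
  exact ⟨a, by simpa using ha, b, by simpa using hb, rfl⟩

theorem getD_pvMkD {N : List Int} (hN : N.Nodup) (m : List (List (Option Int))) {a b : Nat}
    (ha : a < N.length) (hb : b < N.length) :
    (pvMkD N m).getD (pvKey N a b) none = pvGetM m a b :=
  PySem.Dict.getD_of_mem_items _ (mem_items_pvMkD N m ha hb) (nodup_keys_pvMkD hN m) none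

theorem insert_pvMkD {N : List Int} (hN : N.Nodup) {n : Nat} (hn : n = N.length)
    {m : List (List (Option Int))} (hw : pvWf n m) {i j : Nat}
    (hi : i < n) (hj : j < n) (v : Option Int) :
    (pvMkD N m).insert (pvKey N i j) v = pvMkD N (pvSetM m i j v) := by
  subst hn
  have hcon : (pvMkD N m).contains (pvKey N i j) = true := by
    rw [PySem.Dict.contains_eq_decide_mem_keys, decide_eq_true_iff, keys_pvMkD]
    rw [List.mem_flatMap]
    exact ⟨i, by simpa using hi, by simp only [List.mem_map]; exact ⟨j, by simpa using hj, rfl⟩⟩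
  apply PySem.Dict.ext
  rw [PySem.Dict.items_insert_of_contains _ _ hcon]
  simp only [pvMkD, List.map_flatMap, List.map_map]
  apply List.flatMap_congr
  intro a hamem
  apply List.map_congr_left
  intro b hbmem
  rw [List.mem_range] at hamem hbmem
  simp only [Function.comp_def]
  by_cases hab : a = i ∧ b = j
  · obtain ⟨rfl, rfl⟩ := hab
    rw [if_pos (by simp), pvGetM_set_self hw hi hj]
  · have hne : pvKey N a b ≠ pvKey N i j := fun hcontra =>
      hab (pvKey_inj hN hamem hbmem hi hj hcontra)
    rw [if_neg (by simpa using hne), pvGetM_set_ne m v hab]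

theorem getD_pvMkD' {N : List Int} (hN : N.Nodup) (m : List (List (Option Int))) {a b : Nat}
    (ha : a < N.length) (hb : b < N.length) :
    (pvMkD N m).getD (N.getD a 0, N.getD b 0) none = pvGetM m a b :=
  getD_pvMkD hN m ha hb

theorem insert_pvMkD' {N : List Int} (hN : N.Nodup)
    {m : List (List (Option Int))} (hw : pvWf N.length m) {i j : Nat}
    (hi : i < N.length) (hj : j < N.length) (v : Option Int) :
    (pvMkD N m).insert (N.getD i 0, N.getD j 0) v = pvMkD N (pvSetM m i j v) :=
  insert_pvMkD hN rfl hw hi hj v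

theorem pvWf_foldl {n : Nat} {β : Type} {F : List (List (Option Int)) → β → List (List (Option Int))}
    (hF : ∀ m b, pvWf n m → pvWf n (F m b)) :
    ∀ (l : List β) m, pvWf n m → pvWf n (l.foldl F m) := by
  intro l
  induction l with
  | nil => intro m hw; exact hw
  | cons b t ih => intro m hw; exact ih _ (hF m b hw)

theorem pvWf_step {n : Nat} {m : List (List (Option Int))} (hw : pvWf n m) (k i j : Nat) :
    pvWf n (pvStep m k i j) := pvWf_set hw i j _

theorem pv_roundJ {N : List Int} (hN : N.Nodup) {k i : Nat} (hk : k < N.length) (hi : i < N.length) :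
    ∀ (l : List Nat), (∀ j ∈ l, j < N.length) → ∀ m, pvWf N.length m →
      l.foldl (fun d j => d.insert (N.getD i 0, N.getD j 0)
          (pvOmin (d.getD (N.getD i 0, N.getD j 0) none)
            (pvOadd (d.getD (N.getD i 0, N.getD k 0) none) (d.getD (N.getD k 0, N.getD j 0) none))))
        (pvMkD N m)
      = pvMkD N (l.foldl (fun m j => pvStep m k i j) m) := by
  intro l
  induction l with
  | nil => intro _ m _; rfl
  | cons j t ih =>
    intro hl m hw
    have hj : j < N.length := hl j List.mem_cons_self
    rw [List.foldl_cons, List.foldl_cons,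
        getD_pvMkD' hN m hi hj, getD_pvMkD' hN m hi hk, getD_pvMkD' hN m hk hj,
        insert_pvMkD' hN hw hi hj]
    exact ih (fun x hx => hl x (List.mem_cons_of_mem _ hx)) _ (pvWf_step hw k i j)

theorem pv_roundI {N : List Int} (hN : N.Nodup) {k : Nat} (hk : k < N.length) :
    ∀ (l : List Nat), (∀ i ∈ l, i < N.length) → ∀ m, pvWf N.length m →
      l.foldl (fun d i => (List.range N.length).foldl (fun d j => d.insert (N.getD i 0, N.getD j 0)
          (pvOmin (d.getD (N.getD i 0, N.getD j 0) none)
            (pvOadd (d.getD (N.getD i 0, N.getD k 0) none) (d.getD (N.getD k 0, N.getD j 0) none)))) d)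
        (pvMkD N m)
      = pvMkD N (l.foldl (fun m i => (List.range N.length).foldl (fun m j => pvStep m k i j) m) m) := by
  intro l
  induction l with
  | nil => intro _ m _; rfl
  | cons i t ih =>
    intro hl m hw
    have hi : i < N.length := hl i List.mem_cons_self
    rw [List.foldl_cons, List.foldl_cons,
        pv_roundJ hN hk hi (List.range N.length) (fun x hx => List.mem_range.1 hx) m hw]
    exact ih (fun x hx => hl x (List.mem_cons_of_mem _ hx)) _
      (pvWf_foldl (fun m b hw' => pvWf_step hw' k i b) _ m hw)

theorem pv_roundK {N : List Int} (hN : N.Nodup) :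
    ∀ (l : List Nat), (∀ k ∈ l, k < N.length) → ∀ m, pvWf N.length m →
      l.foldl (fun d k => (List.range N.length).foldl (fun d i => (List.range N.length).foldl
          (fun d j => d.insert (N.getD i 0, N.getD j 0)
            (pvOmin (d.getD (N.getD i 0, N.getD j 0) none)
              (pvOadd (d.getD (N.getD i 0, N.getD k 0) none) (d.getD (N.getD k 0, N.getD j 0) none)))) d) d)
        (pvMkD N m)
      = pvMkD N (l.foldl (fun m k => (List.range N.length).foldl
          (fun m i => (List.range N.length).foldl (fun m j => pvStep m k i j) m) m) m) := by
  intro l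
  induction l with
  | nil => intro _ m _; rfl
  | cons k t ih =>
    intro hl m hw
    have hk : k < N.length := hl k List.mem_cons_self
    rw [List.foldl_cons, List.foldl_cons,
        pv_roundI hN hk (List.range N.length) (fun x hx => List.mem_range.1 hx) m hw]
    exact ih (fun x hx => hl x (List.mem_cons_of_mem _ hx)) _
      (pvWf_foldl (fun m b hw' =>
        pvWf_foldl (fun m' b' hw'' => pvWf_step hw'' k b b') _ m hw') _ m hw)

-- ----- node collection: B's (seen, nodes) pair tracks A's set -----
theorem pv_nodes_inner (ks : List Int) :
    ∀ s : PySem.Set Int,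
      ks.foldl (fun (st : PySem.Set Int × List Int) v =>
          if PySem.Set.contains st.1 v then st else (PySem.Set.add st.1 v, st.2 ++ [v])) (s, s)
      = (ks.foldl (fun s v => PySem.Set.add s v) s, ks.foldl (fun s v => PySem.Set.add s v) s) := by
  induction ks with
  | nil => intro s; rfl
  | cons v t ih =>
    intro s
    rw [List.foldl_cons, List.foldl_cons]
    have hstep : (if PySem.Set.contains s v then ((s, s) : PySem.Set Int × List Int)
        else (PySem.Set.add s v, s ++ [v])) = (PySem.Set.add s v, PySem.Set.add s v) := by
      simp only [PySem.Set.add]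
      split_ifs <;> rfl
    rw [hstep]
    exact ih _

theorem pv_nodes_eq (items : List (Int × List (Int × Int))) :
    ∀ s : PySem.Set Int,
      items.foldl (fun (st : PySem.Set Int × List Int) p =>
          ((PySem.Dict.ofList p.2).keys).foldl
            (fun st v => if PySem.Set.contains st.1 v then st else (PySem.Set.add st.1 v, st.2 ++ [v]))
            (if PySem.Set.contains st.1 p.1 then st else (PySem.Set.add st.1 p.1, st.2 ++ [p.1])))
        (s, s)
      = (items.foldl (fun s p => ((PySem.Dict.ofList p.2).keys).foldl
            (fun s v => PySem.Set.add s v) (PySem.Set.add s p.1)) s,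
         items.foldl (fun s p => ((PySem.Dict.ofList p.2).keys).foldl
            (fun s v => PySem.Set.add s v) (PySem.Set.add s p.1)) s) := by
  induction items with
  | nil => intro s; rfl
  | cons p t ih =>
    intro s
    simp only [List.foldl_cons]
    have hstep : (if PySem.Set.contains ((s, s) : PySem.Set Int × List Int).1 p.1
          then ((s, s) : PySem.Set Int × List Int)
          else (PySem.Set.add ((s, s) : PySem.Set Int × List Int).1 p.1,
                ((s, s) : PySem.Set Int × List Int).2 ++ [p.1]))
        = (PySem.Set.add s p.1, PySem.Set.add s p.1) := by
      simp only [PySem.Set.add]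
      split_ifs <;> rfl
    rw [hstep, pv_nodes_inner]
    exact ih _

theorem pv_fold_add_nodup (ks : List Int) :
    ∀ s : PySem.Set Int, s.Nodup → (ks.foldl (fun s v => PySem.Set.add s v) s).Nodup := by
  induction ks with
  | nil => intro s hs; exact hs
  | cons v t ih => intro s hs; exact ih _ (PySem.Set.nodup_add s v hs)

theorem pv_nodes_nodup (items : List (Int × List (Int × Int))) :
    ∀ s : PySem.Set Int, s.Nodup →
      (items.foldl (fun s p => ((PySem.Dict.ofList p.2).keys).foldl
          (fun s v => PySem.Set.add s v) (PySem.Set.add s p.1)) s).Nodup := by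
  induction items with
  | nil => intro s hs; exact hs
  | cons p t ih =>
    intro s hs
    exact ih _ (pv_fold_add_nodup _ _ (PySem.Set.nodup_add s p.1 hs))

-- ----- initialisation -----
theorem pv_branch (d : PySem.Dict (Int × Int) (Option Int)) (u v : Int) (x : Option Int) :
    (if u = v then d.insert (u, v) (some 0)
     else
       match x with
       | some w => d.insert (u, v) (some w)
       | none => d.insert (u, v) none)
    = d.insert (u, v) (if u = v then some 0 else x) := by
  by_cases h : u = v
  · rw [if_pos h, if_pos h]
  · rw [if_neg h, if_neg h]
    cases x <;> rfl

theorem pv_init {N : List Int} (hN : N.Nodup) (W : Nat → Nat → Option Int) :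
    ∀ a ≤ N.length,
      (List.range a).foldl (fun d i => (List.range N.length).foldl
          (fun d j => d.insert (N.getD i 0, N.getD j 0) (W i j)) d)
        (PySem.Dict.empty : PySem.Dict (Int × Int) (Option Int))
      = PySem.Dict.mk ((List.range a).flatMap (fun i =>
          (List.range N.length).map (fun j => ((N.getD i 0, N.getD j 0), W i j)))) := by
  intro a
  induction a with
  | zero => intro _; rfl
  | succ a ih =>
    intro ha
    have ha' : a < N.length := by omega
    rw [List.range_succ, List.foldl_append, ih (by omega), List.foldl_cons, List.foldl_nil]
    set d := PySem.Dict.mk ((List.range a).flatMap (fun i =>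
      (List.range N.length).map (fun j => ((N.getD i 0, N.getD j 0), W i j)))) with hd
    have hkeys : d.keys = (List.range a).flatMap (fun i =>
        (List.range N.length).map (fun j => (N.getD i 0, N.getD j 0))) := by
      simp [hd, PySem.Dict.keys, List.map_flatMap, Function.comp_def]
    have hfresh : ∀ b ∈ List.range N.length,
        d.contains ((fun j => ((N.getD a 0, N.getD j 0) : Int × Int)) b) = false := by
      intro b hb
      rw [PySem.Dict.contains_eq_decide_mem_keys, decide_eq_false_iff_not, hkeys]
      intro hmem
      rw [List.mem_flatMap] at hmem
      obtain ⟨i, hi, hmem⟩ := hmem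
      rw [List.mem_map] at hmem
      obtain ⟨j, hj, hpair⟩ := hmem
      rw [List.mem_range] at hi hj hb
      have := (pvKey_inj hN (show i < N.length by omega) hj ha' hb hpair).1
      omega
    have hnd : (List.map (fun j => ((N.getD a 0, N.getD j 0) : Int × Int)) (List.range N.length)).Nodup := by
      apply List.Nodup.map_on _ List.nodup_range
      intro x hx y hy hxy
      rw [List.mem_range] at hx hy
      exact (pvKey_inj hN ha' hx ha' hy hxy).2
    have := PySem.Dict.items_foldl_insert_fresh (List.range N.length)
      (fun j => ((N.getD a 0, N.getD j 0) : Int × Int)) (fun j => W a j) d hfresh hnd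
    apply PySem.Dict.ext
    rw [this]
    simp [hd, List.flatMap_append]

theorem pv_getD_map_range {α : Type} (f : Nat → α) {i n : Nat} (h : i < n) (d : α) :
    ((List.range n).map f).getD i d = f i := by
  rw [List.getD_eq_getElem?_getD, List.getElem?_map, List.getElem?_range h]
  rfl

theorem pvGetM_mat {n : Nat} (E : Nat → Nat → Option Int) {i j : Nat} (hi : i < n) (hj : j < n) :
    pvGetM ((List.range n).map (fun i => (List.range n).map (fun j => E i j))) i j = E i j := by
  unfold pvGetM
  rw [pv_getD_map_range _ hi, pv_getD_map_range _ hj]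

theorem pvWf_mat (n : Nat) (E : Nat → Nat → Option Int) :
    pvWf n ((List.range n).map (fun i => (List.range n).map (fun j => E i j))) := by
  constructor
  · simp
  · intro r hr
    rw [List.mem_map] at hr
    obtain ⟨i, _, rfl⟩ := hr
    simp

-- ----- output assembly -----
theorem pv_filterMap_flatMap {α β γ : Type} (l : List α) (f : α → List β) (g : β → Option γ) :
    (l.flatMap f).filterMap g = l.flatMap (fun x => (f x).filterMap g) := by
  induction l with
  | nil => rfl
  | cons x t ih => rw [List.flatMap_cons, List.filterMap_append, ih, List.flatMap_cons]

theorem pv_final (N : List Int) (m : List (List (Option Int))) :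
    (pvMkD N m).items.filterMap (fun p =>
      match p.2 with
      | some w => some (p.1.1, p.1.2, w)
      | none => none)
    = (List.range N.length).flatMap (fun i => (List.range N.length).filterMap (fun j =>
        (pvGetM m i j).map (fun w => (N.getD i 0, N.getD j 0, w)))) := by
  simp only [pvMkD]
  rw [pv_filterMap_flatMap]
  apply List.flatMap_congr
  intro i _
  rw [List.filterMap_map]
  apply List.filterMap_congr
  intro j _
  simp only [Function.comp_def]
  cases pvGetM m i j <;> rfl

theorem pv_nodes_eq0 (items : List (Int × List (Int × Int))) :
    items.foldl (fun (st : PySem.Set Int × List Int) p =>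
        ((PySem.Dict.ofList p.2).keys).foldl
          (fun st v => if PySem.Set.contains st.1 v then st else (PySem.Set.add st.1 v, st.2 ++ [v]))
          (if PySem.Set.contains st.1 p.1 then st else (PySem.Set.add st.1 p.1, st.2 ++ [p.1])))
      (PySem.Set.empty, ([] : List Int))
    = (items.foldl (fun s p => ((PySem.Dict.ofList p.2).keys).foldl
          (fun s v => PySem.Set.add s v) (PySem.Set.add s p.1)) PySem.Set.empty,
       items.foldl (fun s p => ((PySem.Dict.ofList p.2).keys).foldl
          (fun s v => PySem.Set.add s v) (PySem.Set.add s p.1)) PySem.Set.empty) :=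
  pv_nodes_eq items PySem.Set.empty

theorem pv_init_mk {N : List Int} (hN : N.Nodup) (E : Nat → Nat → Option Int) :
    PySem.Dict.mk ((List.range N.length).flatMap (fun i => (List.range N.length).map (fun j =>
        ((N.getD i 0, N.getD j 0), if N.getD i 0 = N.getD j 0 then some 0 else E i j))))
    = pvMkD N ((List.range N.length).map (fun i => (List.range N.length).map (fun j =>
        if i = j then some 0 else E i j))) := by
  unfold pvMkD
  apply congrArg
  apply List.flatMap_congr
  intro i hi
  apply List.map_congr_left
  intro j hj
  rw [List.mem_range] at hi hj
  rw [pvGetM_mat (fun i j => if i = j then some 0 else E i j) hi hj]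
  unfold pvKey
  by_cases h : i = j
  · subst h
    rw [if_pos rfl, if_pos rfl]
  · have hne : N.getD i 0 ≠ N.getD j 0 := by
      intro hc
      apply h
      rw [List.getD_eq_getElem?_getD, List.getElem?_eq_getElem hi,
          List.getD_eq_getElem?_getD, List.getElem?_eq_getElem hj] at hc
      exact (hN.getElem_inj_iff).1 (by simpa using hc)
    rw [if_neg h, if_neg hne]

-- =========================================================================
-- ===== semantic layer: walks, costs, potentials (values in WithTop Int) ==
-- =========================================================================

-- Option Int viewed as WithTop Int (none = +inf)
def pvT : Option Int → WithTop Int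
  | none => ⊤
  | some a => (a : WithTop Int)

def pvD (m : List (List (Option Int))) (i j : Nat) : WithTop Int := pvT (pvGetM m i j)

-- cost of the walk i -> p (list of successive vertices) under one-step costs E
def pvCost (E : Nat → Nat → Option Int) : Nat → List Nat → WithTop Int
  | _, [] => 0
  | i, j :: p => pvT (E i j) + pvCost E j p

-- pointwise comparison of matrices
def pvMle (m m' : List (List (Option Int))) : Prop := ∀ i j, pvD m i j ≤ pvD m' i j

-- every finite entry is the cost of an actual walk
def pvSound (E : Nat → Nat → Option Int) (n : Nat) (m : List (List (Option Int))) : Prop :=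
  ∀ i j, i < n → j < n → pvGetM m i j ≠ none →
    ∃ p, (∀ x ∈ p, x < n) ∧ p.getLastD i = j ∧ pvCost E i p = pvD m i j

theorem pvT_omin (x y : Option Int) : pvT (pvOmin x y) = min (pvT x) (pvT y) := by
  cases x <;> cases y <;> simp [pvT, pvOmin, min_def, le_top] <;> split_ifs <;> rfl

theorem pvT_oadd (x y : Option Int) : pvT (pvOadd x y) = pvT x + pvT y := by
  cases x <;> cases y <;> simp [pvT, pvOadd]

theorem pvT_inj {x y : Option Int} (h : pvT x = pvT y) : x = y := by
  cases x <;> cases y <;> simp_all [pvT]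

theorem pvT_ne_top {x : Option Int} (h : pvT x ≠ ⊤) : x ≠ none := by
  cases x <;> simp_all [pvT]

theorem pvCost_append (E : Nat → Nat → Option Int) (p q : List Nat) :
    ∀ i, pvCost E i (p ++ q) = pvCost E i p + pvCost E (p.getLastD i) q := by
  induction p with
  | nil => intro i; simp [pvCost]
  | cons j p ih =>
    intro i
    simp only [List.cons_append, pvCost, ih j, List.getLastD_cons, add_assoc]

-- ----- pointwise decrease -----
theorem pvMle_refl (m : List (List (Option Int))) : pvMle m m := fun _ _ => le_refl _

theorem pvMle_trans {a b c : List (List (Option Int))} (h1 : pvMle a b) (h2 : pvMle b c) :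
    pvMle a c := fun i j => le_trans (h1 i j) (h2 i j)

-- a pvSetM either lands in range (and the entry reads back) or is a no-op
theorem pvSetM_eq_or (m : List (List (Option Int))) (i j : Nat) (v : Option Int) :
    pvSetM m i j v = m ∨ pvGetM (pvSetM m i j v) i j = v := by
  by_cases hi : i < m.length
  · by_cases hj : j < (m.getD i []).length
    · right
      unfold pvSetM pvGetM
      rw [pv_getD_set_self m hi, pv_getD_set_self _ hj]
    · left
      unfold pvSetM
      rw [List.set_eq_of_length_le (Nat.le_of_not_lt hj), pv_set_getD_self]
  · left
    unfold pvSetM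
    rw [List.set_eq_of_length_le (Nat.le_of_not_lt hi)]

theorem pvMle_set {m : List (List (Option Int))} {i j : Nat} {v : Option Int}
    (h : pvT v ≤ pvD m i j) : pvMle (pvSetM m i j v) m := by
  intro a b
  by_cases hab : a = i ∧ b = j
  · obtain ⟨rfl, rfl⟩ := hab
    rcases pvSetM_eq_or m a b v with heq | hget
    · rw [heq]
    · rw [pvD, hget]; exact h
  · rw [pvD, pvGetM_set_ne m v hab]
    exact le_refl _

theorem pvMle_foldl {β : Type} {F : List (List (Option Int)) → β → List (List (Option Int))}
    (hF : ∀ m b, pvMle (F m b) m) :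
    ∀ (l : List β) m, pvMle (l.foldl F m) m := by
  intro l
  induction l with
  | nil => intro m; exact pvMle_refl m
  | cons b t ih => intro m; exact pvMle_trans (ih _) (hF m b)

theorem pvMle_step (m : List (List (Option Int))) (k i j : Nat) : pvMle (pvStep m k i j) m := by
  apply pvMle_set
  rw [pvT_omin]
  exact min_le_left _ _

-- each micro-step of pvRound only decreases entries
theorem pvMle_micro (d new : List (List (Option Int))) (a : Int) (i j t : Nat) :
    pvMle (match pvGetM d j t with
           | none => new
           | some b =>
             match pvGetM new i t with
             | none => pvSetM new i t (some (a + b))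
             | some cur => if a + b < cur then pvSetM new i t (some (a + b)) else new) new := by
  cases hb : pvGetM d j t with
  | none => exact pvMle_refl new
  | some b =>
    dsimp only
    cases hcur : pvGetM new i t with
    | none =>
      dsimp only
      apply pvMle_set
      rw [pvD, hcur]
      exact le_top
    | some cur =>
      dsimp only
      by_cases hlt : a + b < cur
      · rw [if_pos hlt]
        apply pvMle_set
        rw [pvD, hcur, pvT, pvT]
        exact_mod_cast le_of_lt hlt
      · rw [if_neg hlt]
        exact pvMle_refl new

theorem pvMle_round (wt : List (List (Option Int))) (n : Nat) (d : List (List (Option Int))) :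
    pvMle (pvRound wt n d) d := by
  unfold pvRound
  apply pvMle_foldl
  intro m i
  apply pvMle_foldl
  intro m' j
  cases ha : pvGetM wt i j with
  | none => exact pvMle_refl m'
  | some a =>
    apply pvMle_foldl
    intro m'' t
    exact pvMle_micro d m'' a i j t

-- generic fold preservation
theorem pv_fold_pres {β : Type} (P : List (List (Option Int)) → Prop)
    {F : List (List (Option Int)) → β → List (List (Option Int))} (l : List β)
    (h : ∀ m b, b ∈ l → P m → P (F m b)) : ∀ m, P m → P (l.foldl F m) := by
  induction l with
  | nil => intro m hm; exact hm
  | cons b t ih =>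
    intro m hm
    exact ih (fun m' b' hb' hm' => h m' b' (List.mem_cons_of_mem _ hb') hm') _
      (h m b List.mem_cons_self hm)

-- ----- the Bellman-Ford potential extracted from Pre_ -----
def pvFinalD (graph : List (Int × List (Int × Int))) : PySem.Dict Int Int :=
  (pvPreNodes graph).foldl
    (fun d _ => (pvPreEdges graph).foldl (fun d e =>
      if d.getD e.1 0 + e.2.2 < d.getD e.2.1 0 then d.insert e.2.1 (d.getD e.1 0 + e.2.2) else d) d)
    PySem.Dict.empty

theorem pv_pre_prop {graph : List (Int × List (Int × Int))}
    (h : pvPreNoNegCycle graph = true) :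
    ∀ e ∈ pvPreEdges graph,
      (pvFinalD graph).getD e.2.1 0 ≤ (pvFinalD graph).getD e.1 0 + e.2.2 := by
  intro e he
  unfold pvPreNoNegCycle at h
  rw [List.all_eq_true] at h
  have := h e he
  rw [decide_eq_true_iff] at this
  exact this

theorem pv_edge_mem {graph : List (Int × List (Int × Int))} {u v w : Int}
    (hne : v ≠ u)
    (hlook : (PySem.Dict.ofList ((PySem.Dict.ofList graph).getD u [])).get? v = some w) :
    (u, v, w) ∈ pvPreEdges graph := by
  rcases hL : (PySem.Dict.ofList graph).get? u with _ | L
  · exfalso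
    rw [PySem.Dict.getD_eq_get?_getD, hL] at hlook
    simp [PySem.Dict.ofList] at hlook
    cases hlook
  · have hmemu : (u, L) ∈ (PySem.Dict.ofList graph).items :=
      PySem.Dict.mem_items_of_get?_eq_some _ hL
    rw [PySem.Dict.getD_eq_get?_getD, hL] at hlook
    have hmemv : (v, w) ∈ (PySem.Dict.ofList L).items :=
      PySem.Dict.mem_items_of_get?_eq_some _ hlook
    unfold pvPreEdges
    rw [List.mem_flatMap]
    refine ⟨(u, L), hmemu, ?_⟩
    rw [List.mem_filterMap]
    exact ⟨(v, w), hmemv, by simp [hne]⟩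

-- walk lower bound from the potential: h(last) ≤ h(start) + cost
theorem pv_pot_walk (E : Nat → Nat → Option Int) (h : Nat → Int)
    (hpot : ∀ x y, (h y : WithTop Int) ≤ (h x : WithTop Int) + pvT (E x y)) :
    ∀ (p : List Nat) (i : Nat),
      ((h (p.getLastD i) : Int) : WithTop Int) ≤ (h i : WithTop Int) + pvCost E i p := by
  intro p
  induction p with
  | nil => intro i; simp [pvCost]
  | cons j q ih =>
    intro i
    rw [List.getLastD_cons, pvCost, ← add_assoc]
    exact le_trans (ih j) (add_le_add (hpot i j) (le_refl _))

theorem pv_cycle_nonneg (E : Nat → Nat → Option Int) (h : Nat → Int)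
    (hpot : ∀ x y, (h y : WithTop Int) ≤ (h x : WithTop Int) + pvT (E x y))
    {p : List Nat} {i : Nat} (hlast : p.getLastD i = i) :
    (0 : WithTop Int) ≤ pvCost E i p := by
  have := pv_pot_walk E h hpot p i
  rw [hlast] at this
  rcases hc : pvCost E i p with _ | c
  · exact le_top
  · rw [hc] at this
    have h2 : ((h i : Int) : WithTop Int) ≤ ((h i + c : Int) : WithTop Int) := by
      rw [WithTop.coe_add]; exact this
    have h3 : (h i : Int) ≤ h i + c := (WithTop.le_coe rfl).mp h2
    show ((0 : Int) : WithTop Int) ≤ ((c : Int) : WithTop Int)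
    exact WithTop.coe_le_coe.mpr (by omega)


theorem pv_getLastD_append {α : Type} (l₁ l₂ : List α) (d : α) :
    (l₁ ++ l₂).getLastD d = l₂.getLastD (l₁.getLastD d) := by
  induction l₁ generalizing d with
  | nil => rfl
  | cons a l ih => rw [List.cons_append, List.getLastD_cons, List.getLastD_cons, ih]

-- a non-Nodup list contains a repeated element, split out
theorem pv_dup_decomp {α : Type} (l : List α) (h : ¬ l.Nodup) :
    ∃ (x : α) (s t u : List α), l = s ++ x :: (t ++ x :: u) := by
  induction l with
  | nil => exact absurd List.nodup_nil h
  | cons a l ih =>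
    by_cases ha : a ∈ l
    · obtain ⟨t, u, rfl⟩ := List.mem_iff_append.mp ha
      exact ⟨a, [], t, u, rfl⟩
    · have hl : ¬ l.Nodup := fun hnd => h (List.nodup_cons.mpr ⟨ha, hnd⟩)
      obtain ⟨x, s, t, u, rfl⟩ := ih hl
      exact ⟨x, a :: s, t, u, rfl⟩

-- cycle removal: any walk dominates a duplicate-free walk with the same endpoints
theorem pv_removal (E : Nat → Nat → Option Int) (h : Nat → Int)
    (hpot : ∀ x y, (h y : WithTop Int) ≤ (h x : WithTop Int) + pvT (E x y)) (n : Nat) :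
    ∀ (L : Nat) (i : Nat) (p : List Nat), p.length ≤ L → i < n → (∀ x ∈ p, x < n) →
      ∃ q, (∀ x ∈ q, x < n) ∧ (i :: q).Nodup ∧ q.getLastD i = p.getLastD i ∧
        pvCost E i q ≤ pvCost E i p := by
  intro L
  induction L with
  | zero =>
    intro i p hlen _ _
    have : p = [] := List.length_eq_zero_iff.mp (Nat.le_zero.mp hlen)
    subst this
    exact ⟨[], by simp, by simp, rfl, le_refl _⟩
  | succ L ih =>
    intro i p hlen hi hp
    by_cases hnd : (i :: p).Nodup
    · exact ⟨p, hp, hnd, rfl, le_refl _⟩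
    · obtain ⟨x, s, t, u, hdec⟩ := pv_dup_decomp _ hnd
      cases s with
      | nil =>
        -- i :: p = i :: (t ++ i :: u) : the walk returns to i; drop the leading cycle
        rw [List.nil_append] at hdec
        have h1 : x = i := (List.head_eq_of_cons_eq hdec).symm
        subst h1
        have h2 : p = t ++ x :: u := List.tail_eq_of_cons_eq hdec
        have hsplit : p = (t ++ [x]) ++ u := by rw [h2, List.append_cons]
        have hcost : pvCost E x u ≤ pvCost E x p := by
          rw [hsplit, pvCost_append, List.getLastD_concat]
          exact le_add_of_nonneg_left (pv_cycle_nonneg E h hpot List.getLastD_concat)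
        have hlast : u.getLastD x = p.getLastD x := by
          rw [hsplit, pv_getLastD_append, List.getLastD_concat]
        have hulen : u.length ≤ L := by
          rw [hsplit] at hlen
          simp at hlen
          omega
        obtain ⟨q, hq1, hq2, hq3, hq4⟩ := ih x u hulen hi
          (fun y hy => hp y (by rw [hsplit]; exact List.mem_append_right _ hy))
        exact ⟨q, hq1, hq2, by rw [hq3, hlast], le_trans hq4 hcost⟩
      | cons y s' =>
        -- i :: p = i :: (s' ++ x :: t ++ x :: u) : cut the cycle at x
        have h2 : p = s' ++ x :: (t ++ x :: u) := List.tail_eq_of_cons_eq hdec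
        have hx : x < n := hp x (by rw [h2]; simp)
        have hsplit : p = (s' ++ [x]) ++ ((t ++ [x]) ++ u) := by
          rw [h2, List.append_cons s' x, List.append_cons t x, List.append_assoc]
        have hcost : pvCost E i ((s' ++ [x]) ++ u) ≤ pvCost E i p := by
          rw [hsplit, pvCost_append E (s' ++ [x]) u, pvCost_append E (s' ++ [x]) ((t ++ [x]) ++ u),
              List.getLastD_concat]
          apply add_le_add (le_refl _)
          rw [pvCost_append E (t ++ [x]) u, List.getLastD_concat]
          exact le_add_of_nonneg_left (pv_cycle_nonneg E h hpot List.getLastD_concat)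
        have hlast : ((s' ++ [x]) ++ u).getLastD i = p.getLastD i := by
          rw [hsplit, pv_getLastD_append (s' ++ [x]) u, pv_getLastD_append (s' ++ [x]) ((t ++ [x]) ++ u),
              pv_getLastD_append (t ++ [x]) u, List.getLastD_concat, List.getLastD_concat]
        have hq0len : ((s' ++ [x]) ++ u).length ≤ L := by
          rw [hsplit] at hlen
          simp at hlen ⊢
          omega
        have hq0mem : ∀ z ∈ (s' ++ [x]) ++ u, z < n := by
          intro z hz
          apply hp z
          rw [hsplit]
          simp at hz ⊢
          tauto
        obtain ⟨q, hq1, hq2, hq3, hq4⟩ := ih i ((s' ++ [x]) ++ u) hq0len hi hq0mem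
        exact ⟨q, hq1, hq2, by rw [hq3, hlast], le_trans hq4 hcost⟩

-- ----- soundness: every finite entry is the cost of an actual walk -----
theorem pvSound_set {E : Nat → Nat → Option Int} {n : Nat} {m : List (List (Option Int))}
    (hw : pvWf n m) (hs : pvSound E n m) {i t : Nat} (hi : i < n) (ht : t < n)
    {v : Option Int}
    (hv : v = none ∨ ∃ p, (∀ x ∈ p, x < n) ∧ p.getLastD i = t ∧ pvCost E i p = pvT v) :
    pvSound E n (pvSetM m i t v) := by
  intro a b ha hb hne
  by_cases hab : a = i ∧ b = t
  · obtain ⟨rfl, rfl⟩ := hab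
    rw [pvGetM_set_self hw hi ht] at hne
    rcases hv with rfl | ⟨p, hp1, hp2, hp3⟩
    · exact absurd rfl hne
    · exact ⟨p, hp1, hp2, by rw [hp3, pvD, pvGetM_set_self hw hi ht]⟩
  · rw [pvGetM_set_ne m v hab] at hne
    obtain ⟨p, hp1, hp2, hp3⟩ := hs a b ha hb hne
    exact ⟨p, hp1, hp2, by rw [hp3, pvD, pvD, pvGetM_set_ne m v hab]⟩

theorem pvSound_m0 (E : Nat → Nat → Option Int) (n : Nat) :
    pvSound E n ((List.range n).map (fun i => (List.range n).map (fun j =>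
      if i = j then some 0 else E i j))) := by
  intro i j hi hj hne
  rw [pvGetM_mat _ hi hj] at hne
  by_cases hij : i = j
  · subst hij
    refine ⟨[], by simp, rfl, ?_⟩
    rw [pvD, pvGetM_mat _ hi hj, if_pos rfl]
    rfl
  · refine ⟨[j], by simp [hj], by simp, ?_⟩
    rw [pvD, pvGetM_mat _ hi hj, if_neg hij]
    show pvT (E i j) + 0 = pvT (E i j)
    exact add_zero _

theorem pvD_step {n : Nat} {m : List (List (Option Int))} (hw : pvWf n m)
    {k i j : Nat} (hi : i < n) (hj : j < n) :
    pvD (pvStep m k i j) i j = min (pvD m i j) (pvD m i k + pvD m k j) := by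
  rw [pvD, pvStep, pvGetM_set_self hw hi hj, pvT_omin, pvT_oadd]
  rfl

theorem pvSound_stepFW {E : Nat → Nat → Option Int} {n : Nat} {m : List (List (Option Int))}
    (hw : pvWf n m) (hs : pvSound E n m) {k i j : Nat} (hk : k < n) (hi : i < n) (hj : j < n) :
    pvSound E n (pvStep m k i j) := by
  apply pvSound_set hw hs hi hj
  rcases min_cases (pvD m i j) (pvD m i k + pvD m k j) with ⟨heq, _⟩ | ⟨heq, _⟩ <;>
    simp only [pvD] at heq
  · -- min is the old value
    rcases hv : pvGetM m i j with _ | w <;> rw [hv] at heq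
    · left
      apply pvT_inj
      rw [pvT_omin, pvT_oadd, heq]
    · right
      obtain ⟨p, hp1, hp2, hp3⟩ := hs i j hi hj (by rw [hv]; simp)
      refine ⟨p, hp1, hp2, ?_⟩
      rw [hp3, pvD, hv, pvT_omin, pvT_oadd]
      exact heq.symm
  · -- min is the relaxed sum
    by_cases htop : pvD m i k + pvD m k j = ⊤
    · -- then the old value is also ⊤ and the entry stays none
      left
      apply pvT_inj
      simp only [pvD] at htop
      rw [pvT_omin, pvT_oadd, heq, htop]
      rfl
    · right
      rw [WithTop.add_eq_top, not_or] at htop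
      obtain ⟨p₁, hp11, hp12, hp13⟩ := hs i k hi hk (pvT_ne_top (fun hc => htop.1 (by rw [← hc]; rfl)))
      obtain ⟨p₂, hp21, hp22, hp23⟩ := hs k j hk hj (pvT_ne_top (fun hc => htop.2 (by rw [← hc]; rfl)))
      refine ⟨p₁ ++ p₂, ?_, ?_, ?_⟩
      · intro x hx
        rcases List.mem_append.mp hx with hx | hx
        · exact hp11 x hx
        · exact hp21 x hx
      · rw [pv_getLastD_append, hp12, hp22]
      · rw [pvCost_append, hp12, hp13, hp23, pvD, pvT_omin, pvT_oadd, heq]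
        simp only [pvD]

-- the micro-step of pvRound preserves well-formedness
theorem pvWf_micro {n : Nat} {d new : List (List (Option Int))} (hw : pvWf n new)
    (a : Int) (i j t : Nat) :
    pvWf n (match pvGetM d j t with
            | none => new
            | some b =>
              match pvGetM new i t with
              | none => pvSetM new i t (some (a + b))
              | some cur => if a + b < cur then pvSetM new i t (some (a + b)) else new) := by
  cases pvGetM d j t with
  | none => exact hw
  | some b =>
    dsimp only
    cases pvGetM new i t with
    | none => exact pvWf_set hw i t _
    | some cur =>
      dsimp only
      split_ifs with h
      · exact pvWf_set hw i t _
      · exact hw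

theorem pvSound_round {E : Nat → Nat → Option Int} {n : Nat}
    {wt d : List (List (Option Int))}
    (hwt : ∀ i j, i < n → j < n → pvGetM wt i j = E i j)
    (hwd : pvWf n d) (hsd : pvSound E n d) :
    pvWf n (pvRound wt n d) ∧ pvSound E n (pvRound wt n d) := by
  unfold pvRound
  refine pv_fold_pres (fun m => pvWf n m ∧ pvSound E n m) _ (fun m i hi hm => ?_) d ⟨hwd, hsd⟩
  rw [List.mem_range] at hi
  refine pv_fold_pres (fun m => pvWf n m ∧ pvSound E n m) _ (fun m' j hj hm' => ?_) m hm
  rw [List.mem_range] at hj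
  cases ha : pvGetM wt i j with
  | none => exact hm'
  | some a =>
    dsimp only
    refine pv_fold_pres (fun m => pvWf n m ∧ pvSound E n m) _ (fun m'' t ht hm'' => ?_) m' hm'
    rw [List.mem_range] at ht
    obtain ⟨hw'', hs''⟩ := hm''
    cases hb : pvGetM d j t with
    | none => exact ⟨hw'', hs''⟩
    | some b =>
      dsimp only
      have hwalk : ∃ p, (∀ x ∈ p, x < n) ∧ p.getLastD i = t ∧
          pvCost E i p = pvT (some (a + b)) := by
        obtain ⟨p₂, hp1, hp2, hp3⟩ := hsd j t hj ht (by rw [hb]; simp)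
        refine ⟨j :: p₂, ?_, by rw [List.getLastD_cons, hp2], ?_⟩
        · intro x hx
          rcases List.mem_cons.mp hx with rfl | hx
          · exact hj
          · exact hp1 x hx
        · show pvT (E i j) + pvCost E j p₂ = pvT (some (a + b))
          rw [hp3, ← hwt i j hi hj, ha, pvD, hb]
          show ((a : Int) : WithTop Int) + ((b : Int) : WithTop Int) = ((a + b : Int) : WithTop Int)
          exact (WithTop.coe_add a b).symm
      cases hcur : pvGetM m'' i t with
      | none =>
        exact ⟨pvWf_set hw'' i t _, pvSound_set hw'' hs'' hi ht (Or.inr hwalk)⟩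
      | some cur =>
        dsimp only
        split_ifs with hlt
        · exact ⟨pvWf_set hw'' i t _, pvSound_set hw'' hs'' hi ht (Or.inr hwalk)⟩
        · exact ⟨hw'', hs''⟩

theorem pv_range_split {i n : Nat} (hi : i < n) :
    ∃ l₁ l₂, List.range n = l₁ ++ i :: l₂ :=
  List.mem_iff_append.mp (List.mem_range.mpr hi)

-- after one Floyd-Warshall pivot round on k, every entry is relaxed through k
theorem pvFW_row_le {n : Nat} {k i j : Nat} (hi : i < n) (hj : j < n) (hk : k < n) :
    ∀ (L : List Nat) (m₁ : List (List (Option Int))), pvWf n m₁ → j ∈ L →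
      pvD (L.foldl (fun m j' => pvStep m k i j') m₁) i j ≤ pvD m₁ i k + pvD m₁ k j := by
  intro L m₁ hw hjL
  obtain ⟨l₃, l₄, rfl⟩ := List.mem_iff_append.mp hjL
  rw [List.foldl_append, List.foldl_cons]
  set m₂ := l₃.foldl (fun m j' => pvStep m k i j') m₁ with hm₂
  have h2le : pvMle m₂ m₁ := pvMle_foldl (fun m'' b => pvMle_step m'' k i b) l₃ m₁
  have h2w : pvWf n m₂ := pvWf_foldl (fun m'' j' hw'' => pvWf_step hw'' k i j') l₃ m₁ hw
  have hkey : pvD (pvStep m₂ k i j) i j ≤ pvD m₁ i k + pvD m₁ k j := by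
    rw [pvD_step h2w hi hj]
    exact le_trans (min_le_right _ _) (add_le_add (h2le i k) (h2le k j))
  exact le_trans ((pvMle_foldl (fun m'' b => pvMle_step m'' k i b) l₄ _) i j) hkey

theorem pvFW_outer_le {n : Nat} {k i j : Nat} (hi : i < n) (hj : j < n) (hk : k < n) :
    ∀ (L : List Nat) (m : List (List (Option Int))), pvWf n m → i ∈ L →
      pvD (L.foldl (fun m i' => (List.range n).foldl (fun m j' => pvStep m k i' j') m) m) i j
        ≤ pvD m i k + pvD m k j := by
  intro L m hw hiL
  obtain ⟨l₁, l₂, rfl⟩ := List.mem_iff_append.mp hiL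
  rw [List.foldl_append, List.foldl_cons]
  set m₁ := l₁.foldl (fun m i' => (List.range n).foldl (fun m j' => pvStep m k i' j') m) m with hm₁
  have h1le : pvMle m₁ m :=
    pvMle_foldl (fun m' i' => pvMle_foldl (fun m'' b => pvMle_step m'' k i' b) _ m') l₁ m
  have h1w : pvWf n m₁ :=
    pvWf_foldl (fun m' i' hw' =>
      pvWf_foldl (fun m'' j' hw'' => pvWf_step hw'' k i' j') _ m' hw') l₁ m hw
  have hmid : pvD ((List.range n).foldl (fun m j' => pvStep m k i j') m₁) i j
      ≤ pvD m i k + pvD m k j :=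
    le_trans (pvFW_row_le hi hj hk (List.range n) m₁ h1w (List.mem_range.mpr hj))
      (add_le_add (h1le i k) (h1le k j))
  exact le_trans
    ((pvMle_foldl (fun m' i' => pvMle_foldl (fun m'' b => pvMle_step m'' k i' b) _ m') l₂ _) i j)
    hmid

theorem pvFW_round_le {n : Nat} {m : List (List (Option Int))} (hw : pvWf n m)
    {k i j : Nat} (hk : k < n) (hi : i < n) (hj : j < n) :
    pvD ((List.range n).foldl (fun m i => (List.range n).foldl (fun m j => pvStep m k i j) m) m) i j
      ≤ pvD m i k + pvD m k j :=
  pvFW_outer_le hi hj hk (List.range n) m hw (List.mem_range.mpr hi)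

-- one pvRound relaxes every entry (i,t) through every edge (i,j): B-side upper bound
theorem pvB_micro_le {n : Nat} (d : List (List (Option Int))) (a b : Int) {i j t : Nat}
    (hi : i < n) (ht : t < n) (hb : pvGetM d j t = some b) :
    ∀ (L : List Nat) (m₃ : List (List (Option Int))), pvWf n m₃ → t ∈ L →
      pvD (L.foldl (fun new t =>
          match pvGetM d j t with
          | none => new
          | some b =>
            match pvGetM new i t with
            | none => pvSetM new i t (some (a + b))
            | some cur => if a + b < cur then pvSetM new i t (some (a + b)) else new) m₃) i t
        ≤ ((a + b : Int) : WithTop Int) := by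
  intro L m₃ hw htL
  obtain ⟨l₅, l₆, rfl⟩ := List.mem_iff_append.mp htL
  rw [List.foldl_append, List.foldl_cons]
  set F := (fun new t =>
      match pvGetM d j t with
      | none => new
      | some b =>
        match pvGetM new i t with
        | none => pvSetM new i t (some (a + b))
        | some cur => if a + b < cur then pvSetM new i t (some (a + b)) else new) with hF
  set m₄ := l₅.foldl F m₃ with hm₄
  have h4w : pvWf n m₄ :=
    pvWf_foldl (fun m' t' hw' => by rw [hF]; exact pvWf_micro hw' a i j t') l₅ m₃ hw
  have hkey : pvD (F m₄ t) i t ≤ ((a + b : Int) : WithTop Int) := by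
    rw [hF]
    dsimp only
    rw [hb]
    cases hcur : pvGetM m₄ i t with
    | none =>
      dsimp only
      rw [pvD, pvGetM_set_self h4w hi ht]
      exact le_refl _
    | some cur =>
      dsimp only
      split_ifs with hlt
      · rw [pvD, pvGetM_set_self h4w hi ht]
        exact le_refl _
      · rw [pvD, hcur]
        show ((cur : Int) : WithTop Int) ≤ ((a + b : Int) : WithTop Int)
        exact_mod_cast not_lt.mp hlt
  exact le_trans
    ((pvMle_foldl (fun m' t' => by rw [hF]; exact pvMle_micro d m' a i j t') l₆ _) i t)
    hkey

theorem pvB_j_le {n : Nat} (wt d : List (List (Option Int))) (a b : Int) {i j t : Nat}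
    (hi : i < n) (hj : j < n) (ht : t < n)
    (ha : pvGetM wt i j = some a) (hb : pvGetM d j t = some b) :
    ∀ (L : List Nat) (m₂ : List (List (Option Int))), pvWf n m₂ → j ∈ L →
      pvD (L.foldl (fun new j =>
          match pvGetM wt i j with
          | none => new
          | some a =>
            (List.range n).foldl (fun new t =>
              match pvGetM d j t with
              | none => new
              | some b =>
                match pvGetM new i t with
                | none => pvSetM new i t (some (a + b))
                | some cur => if a + b < cur then pvSetM new i t (some (a + b)) else new) new) m₂) i t
        ≤ ((a + b : Int) : WithTop Int) := by
  intro L m₂ hw hjL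
  obtain ⟨l₃, l₄, rfl⟩ := List.mem_iff_append.mp hjL
  rw [List.foldl_append, List.foldl_cons]
  set G := (fun new j =>
      match pvGetM wt i j with
      | none => new
      | some a =>
        (List.range n).foldl (fun new t =>
          match pvGetM d j t with
          | none => new
          | some b =>
            match pvGetM new i t with
            | none => pvSetM new i t (some (a + b))
            | some cur => if a + b < cur then pvSetM new i t (some (a + b)) else new) new) with hG
  have hGwf : ∀ m' j', pvWf n m' → pvWf n (G m' j') := by
    intro m' j' hw'
    rw [hG]
    dsimp only
    cases pvGetM wt i j' with
    | none => exact hw'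
    | some a' =>
      exact pv_fold_pres (pvWf n) _ (fun m'' t' _ hw'' => pvWf_micro hw'' a' i j' t') m' hw'
  have hGmle : ∀ m' j', pvMle (G m' j') m' := by
    intro m' j'
    rw [hG]
    dsimp only
    cases pvGetM wt i j' with
    | none => exact pvMle_refl m'
    | some a' => exact pvMle_foldl (fun m'' t' => pvMle_micro d m'' a' i j' t') _ m'
  set m₃ := l₃.foldl G m₂ with hm₃
  have h3w : pvWf n m₃ := pvWf_foldl (fun m' j' hw' => hGwf m' j' hw') l₃ m₂ hw
  have hkey : pvD (G m₃ j) i t ≤ ((a + b : Int) : WithTop Int) := by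
    rw [hG]
    dsimp only
    rw [ha]
    exact pvB_micro_le d a b hi ht hb (List.range n) m₃ h3w (List.mem_range.mpr ht)
  exact le_trans ((pvMle_foldl (fun m' j' => hGmle m' j') l₄ _) i t) hkey

theorem pvB_round_le {n : Nat} {wt d : List (List (Option Int))} (hwd : pvWf n d)
    {i j t : Nat} (hi : i < n) (hj : j < n) (ht : t < n) :
    pvD (pvRound wt n d) i t ≤ pvT (pvGetM wt i j) + pvD d j t := by
  cases ha : pvGetM wt i j with
  | none =>
    rw [show pvT none = (⊤ : WithTop Int) from rfl, top_add]
    exact le_top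
  | some a =>
    cases hb : pvGetM d j t with
    | none =>
      rw [show pvD d j t = (⊤ : WithTop Int) from by rw [pvD, hb]; rfl, add_top]
      exact le_top
    | some b =>
      have hrhs : pvT (some a) + pvD d j t = ((a + b : Int) : WithTop Int) := by
        rw [pvD, hb]
        exact (WithTop.coe_add a b).symm
      rw [hrhs]
      unfold pvRound
      set H := (fun new i =>
          (List.range n).foldl (fun new j =>
            match pvGetM wt i j with
            | none => new
            | some a =>
              (List.range n).foldl (fun new t =>
                match pvGetM d j t with
                | none => new
                | some b =>
                  match pvGetM new i t with
                  | none => pvSetM new i t (some (a + b))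
                  | some cur => if a + b < cur then pvSetM new i t (some (a + b)) else new) new) new)
        with hH
      have hHwf : ∀ m' i', pvWf n m' → pvWf n (H m' i') := by
        intro m' i' hw'
        rw [hH]
        dsimp only
        refine pv_fold_pres (pvWf n) _ (fun m'' j' _ hw'' => ?_) m' hw'
        cases pvGetM wt i' j' with
        | none => exact hw''
        | some a' =>
          exact pv_fold_pres (pvWf n) _ (fun m3 t' _ hw3 => pvWf_micro hw3 a' i' j' t') m'' hw''
      have hHmle : ∀ m' i', pvMle (H m' i') m' := by
        intro m' i'
        rw [hH]
        dsimp only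
        apply pvMle_foldl
        intro m'' j'
        cases pvGetM wt i' j' with
        | none => exact pvMle_refl m''
        | some a' => exact pvMle_foldl (fun m3 t' => pvMle_micro d m3 a' i' j' t') _ m''
      obtain ⟨l₁, l₂, hsplit⟩ := pv_range_split hi
      rw [hsplit, List.foldl_append, List.foldl_cons]
      set m₁ := l₁.foldl H d with hm₁
      have h1w : pvWf n m₁ := pvWf_foldl (fun m' i' hw' => hHwf m' i' hw') l₁ d hwd
      have hkey : pvD (H m₁ i) i t ≤ ((a + b : Int) : WithTop Int) := by
        rw [hH]
        dsimp only
        exact pvB_j_le wt d a b hi hj ht ha hb (List.range n) m₁ h1w (List.mem_range.mpr hj)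
      exact le_trans ((pvMle_foldl (fun m' i' => hHmle m' i') l₂ _) i t) hkey

-- ----- upper bound invariants -----

-- after pivots 0..k-1, dist(i,j) is below every duplicate-free walk whose
-- intermediate vertices are all < k
def pvFUB (E : Nat → Nat → Option Int) (n k : Nat) (m : List (List (Option Int))) : Prop :=
  ∀ i j, i < n → j < n → ∀ p, (∀ x ∈ p, x < n) → (i :: p).Nodup → p.getLastD i = j →
    (∀ x ∈ p.dropLast, x < k) → pvD m i j ≤ pvCost E i p

-- dist(i,j) is below every walk of length ≤ r
def pvRUB (E : Nat → Nat → Option Int) (n r : Nat) (d : List (List (Option Int))) : Prop :=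
  ∀ i j, i < n → j < n → ∀ p, (∀ x ∈ p, x < n) → p.getLastD i = j → p.length ≤ r →
    pvD d i j ≤ pvCost E i p

theorem pv_ub_base (E : Nat → Nat → Option Int) (n : Nat) {i j : Nat} (hi : i < n) (hj : j < n)
    (p : List Nat) (hnd : (i :: p).Nodup) (hlast : p.getLastD i = j) (hshort : p.length ≤ 1) :
    pvD ((List.range n).map (fun i => (List.range n).map (fun j =>
      if i = j then some 0 else E i j))) i j ≤ pvCost E i p := by
  match p with
  | [] =>
    simp only [List.getLastD_nil] at hlast
    subst hlast
    rw [pvD, pvGetM_mat _ hi hi, if_pos rfl]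
    exact le_refl _
  | [x] =>
    have hx : x = j := by simpa using hlast
    subst hx
    by_cases hij : i = x
    · exfalso
      rw [hij] at hnd
      simp at hnd
    · rw [pvD, pvGetM_mat _ hi hj, if_neg hij]
      show pvT (E i x) ≤ pvT (E i x) + 0
      rw [add_zero]
  | x :: y :: r => simp at hshort

theorem pvMle_roundFW (n : Nat) (k : Nat) (m : List (List (Option Int))) :
    pvMle ((List.range n).foldl (fun m i => (List.range n).foldl (fun m j => pvStep m k i j) m) m) m :=
  pvMle_foldl (fun m' i' => pvMle_foldl (fun m'' b => pvMle_step m'' k i' b) _ m') _ m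

theorem pvFUB_zero (E : Nat → Nat → Option Int) (n : Nat) :
    pvFUB E n 0 ((List.range n).map (fun i => (List.range n).map (fun j =>
      if i = j then some 0 else E i j))) := by
  intro i j hi hj p hall hnd hlast hmid
  match p with
  | [] => exact pv_ub_base E n hi hj [] hnd hlast (by simp)
  | [x] => exact pv_ub_base E n hi hj [x] hnd hlast (by simp)
  | x :: y :: r =>
    exfalso
    have : x ∈ (x :: y :: r).dropLast := by
      rw [List.dropLast_cons₂]
      exact List.mem_cons_self
    exact absurd (hmid x this) (by omega)

theorem pvFUB_step {E : Nat → Nat → Option Int} {n k : Nat} {m : List (List (Option Int))}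
    (hw : pvWf n m) (hf : pvFUB E n k m) (hk : k < n) :
    pvFUB E n (k + 1)
      ((List.range n).foldl (fun m i => (List.range n).foldl (fun m j => pvStep m k i j) m) m) := by
  intro i j hi hj p hall hnd hlast hmid
  by_cases hcase : ∀ x ∈ p.dropLast, x < k
  · exact le_trans ((pvMle_roundFW n k m) i j) (hf i j hi hj p hall hnd hlast hcase)
  · push_neg at hcase
    obtain ⟨xk, hxkmem, hxkge⟩ := hcase
    have hxk : xk = k := by have := hmid xk hxkmem; omega
    subst hxk
    have hpne : p ≠ [] := by
      intro hcontra
      rw [hcontra] at hxkmem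
      exact absurd hxkmem (List.not_mem_nil)
    set z := p.getLast hpne with hz
    have hzp : p.dropLast ++ [z] = p := List.dropLast_append_getLast hpne
    obtain ⟨s, t, hst⟩ := List.mem_iff_append.mp hxkmem
    have hpeq : p = (s ++ [xk]) ++ (t ++ [z]) := by
      rw [← hzp, hst, List.append_cons s xk t, List.append_assoc]
    have hpnd : p.Nodup := (List.nodup_cons.mp hnd).2
    have hdisj : ∀ x ∈ s ++ [xk], ∀ y ∈ t ++ [z], x ≠ y := by
      rw [hpeq, List.nodup_append] at hpnd
      exact hpnd.2.2
    have hsnd : (s ++ [xk]).Nodup := by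
      rw [hpeq, List.nodup_append] at hpnd
      exact hpnd.1
    have hs_lt : ∀ x ∈ s, x < xk := by
      intro x hx
      have hxlt : x < xk + 1 := hmid x (by rw [hst]; exact List.mem_append_left _ hx)
      have hxne : x ≠ xk := by
        rw [List.nodup_append] at hsnd
        exact hsnd.2.2 x hx xk (by simp)
      omega
    have ht_lt : ∀ x ∈ t, x < xk := by
      intro x hx
      have hxlt : x < xk + 1 := hmid x (by rw [hst]; exact List.mem_append_right _ (List.mem_cons_of_mem _ hx))
      have hxne : xk ≠ x := hdisj xk (by simp) x (List.mem_append_left _ hx)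
      omega
    have h1nd : (i :: (s ++ [xk])).Nodup := by
      have hsub : (i :: (s ++ [xk])).Sublist (i :: p) := by
        rw [hpeq]
        exact List.cons_sublist_cons.mpr (List.sublist_append_left _ _)
      exact hsub.nodup hnd
    have h2nd : (xk :: (t ++ [z])).Nodup := by
      have hip : (i :: p) = (i :: s) ++ (xk :: (t ++ [z])) := by
        rw [hpeq]
        simp
      have hsub : (xk :: (t ++ [z])).Sublist (i :: p) := by
        rw [hip]
        exact List.sublist_append_right _ _
      exact hsub.nodup hnd
    have hall1 : ∀ x ∈ s ++ [xk], x < n := fun x hx => hall x (by rw [hpeq]; exact List.mem_append_left _ hx)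
    have hall2 : ∀ x ∈ t ++ [z], x < n := fun x hx => hall x (by rw [hpeq]; exact List.mem_append_right _ hx)
    have hlast1 : (s ++ [xk]).getLastD i = xk := List.getLastD_concat
    have hlast2 : (t ++ [z]).getLastD xk = j := by
      rw [hpeq] at hlast
      rw [pv_getLastD_append, hlast1] at hlast
      exact hlast
    have hb1 : pvD m i xk ≤ pvCost E i (s ++ [xk]) :=
      hf i xk hi hk (s ++ [xk]) hall1 h1nd hlast1 (by rw [List.dropLast_concat]; exact hs_lt)
    have hb2 : pvD m xk j ≤ pvCost E xk (t ++ [z]) :=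
      hf xk j hk hj (t ++ [z]) hall2 h2nd hlast2 (by rw [List.dropLast_concat]; exact ht_lt)
    calc pvD ((List.range n).foldl
          (fun m i => (List.range n).foldl (fun m j => pvStep m xk i j) m) m) i j
        ≤ pvD m i xk + pvD m xk j := pvFW_round_le hw hk hi hj
      _ ≤ pvCost E i (s ++ [xk]) + pvCost E xk (t ++ [z]) := add_le_add hb1 hb2
      _ = pvCost E i p := by
          rw [hpeq, pvCost_append E (s ++ [xk]) (t ++ [z]), hlast1]

-- full Floyd-Warshall invariant: after the pivots 0..a-1
theorem pvFW_inv (E : Nat → Nat → Option Int) (n : Nat) :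
    ∀ a, a ≤ n →
      pvWf n ((List.range a).foldl (fun m k => (List.range n).foldl
          (fun m i => (List.range n).foldl (fun m j => pvStep m k i j) m) m)
        ((List.range n).map (fun i => (List.range n).map (fun j => if i = j then some 0 else E i j)))) ∧
      pvSound E n ((List.range a).foldl (fun m k => (List.range n).foldl
          (fun m i => (List.range n).foldl (fun m j => pvStep m k i j) m) m)
        ((List.range n).map (fun i => (List.range n).map (fun j => if i = j then some 0 else E i j)))) ∧
      pvFUB E n a ((List.range a).foldl (fun m k => (List.range n).foldl
          (fun m i => (List.range n).foldl (fun m j => pvStep m k i j) m) m)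
        ((List.range n).map (fun i => (List.range n).map (fun j => if i = j then some 0 else E i j)))) := by
  intro a
  induction a with
  | zero =>
    intro _
    exact ⟨pvWf_mat n _, pvSound_m0 E n, pvFUB_zero E n⟩
  | succ a ih =>
    intro ha
    obtain ⟨hw, hs, hf⟩ := ih (by omega)
    rw [List.range_succ, List.foldl_append, List.foldl_cons, List.foldl_nil]
    have han : a < n := by omega
    refine ⟨?_, ?_, pvFUB_step hw hf han⟩
    · exact pvWf_foldl (fun m' i' hw' =>
        pvWf_foldl (fun m'' j' hw'' => pvWf_step hw'' a i' j') _ m' hw') _ _ hw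
    · have := pv_fold_pres (fun m => pvWf n m ∧ pvSound E n m)
        (List.range n) (fun m' i' hi' hm' => pv_fold_pres (fun m => pvWf n m ∧ pvSound E n m)
          (List.range n) (fun m'' j' hj' hm'' =>
            ⟨pvWf_step hm''.1 a i' j',
             pvSound_stepFW hm''.1 hm''.2 han (List.mem_range.mp hi') (List.mem_range.mp hj')⟩)
          m' hm') _ ⟨hw, hs⟩
      exact this.2

theorem pvRUB_zero (E : Nat → Nat → Option Int) (n : Nat) :
    pvRUB E n 0 ((List.range n).map (fun i => (List.range n).map (fun j =>
      if i = j then some 0 else E i j))) := by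
  intro i j hi hj p hall hlast hlen
  have : p = [] := List.length_eq_zero_iff.mp (Nat.le_zero.mp hlen)
  subst this
  exact pv_ub_base E n hi hj [] (by simp) hlast (by simp)

theorem pvRUB_step {E : Nat → Nat → Option Int} {n r : Nat} {wt d : List (List (Option Int))}
    (hwt : ∀ i j, i < n → j < n → pvGetM wt i j = E i j)
    (hwd : pvWf n d) (hr : pvRUB E n r d) : pvRUB E n (r + 1) (pvRound wt n d) := by
  intro i j hi hj p hall hlast hlen
  cases p with
  | nil =>
    simp only [List.getLastD_nil] at hlast
    subst hlast
    exact le_trans ((pvMle_round wt n d) i i) (hr i i hi hi [] (by simp) rfl (by simp))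
  | cons j' q =>
    have hj' : j' < n := hall j' List.mem_cons_self
    have h1 : pvD (pvRound wt n d) i j ≤ pvT (pvGetM wt i j') + pvD d j' j :=
      pvB_round_le hwd hi hj' hj
    have h2 : pvD d j' j ≤ pvCost E j' q :=
      hr j' j hj' hj q (fun x hx => hall x (List.mem_cons_of_mem _ hx))
        (by rw [← List.getLastD_cons]; exact hlast) (by simp at hlen; omega)
    rw [hwt i j' hi hj'] at h1
    exact le_trans h1 (add_le_add (le_refl _) h2)

theorem pvB_iter_inv {E : Nat → Nat → Option Int} {n : Nat} {wt : List (List (Option Int))}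
    (hwt : ∀ i j, i < n → j < n → pvGetM wt i j = E i j) :
    ∀ s, pvWf n ((pvRound wt n)^[s] ((List.range n).map (fun i => (List.range n).map (fun j =>
          if i = j then some 0 else E i j)))) ∧
      pvSound E n ((pvRound wt n)^[s] ((List.range n).map (fun i => (List.range n).map (fun j =>
          if i = j then some 0 else E i j)))) ∧
      pvRUB E n s ((pvRound wt n)^[s] ((List.range n).map (fun i => (List.range n).map (fun j =>
          if i = j then some 0 else E i j)))) := by
  intro s
  induction s with
  | zero => exact ⟨pvWf_mat n _, pvSound_m0 E n, pvRUB_zero E n⟩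
  | succ s ih =>
    obtain ⟨hw, hs, hr⟩ := ih
    rw [Function.iterate_succ_apply']
    obtain ⟨hw', hs'⟩ := pvSound_round hwt hw hs
    exact ⟨hw', hs', pvRUB_step hwt hw hr⟩

theorem pv_loop_spec (wt : List (List (Option Int))) (n : Nat) :
    ∀ (fuel : Nat) (d : List (List (Option Int))),
      ∃ s, s ≤ fuel ∧ pvLoop wt n fuel d = (pvRound wt n)^[s] d ∧
        (s = fuel ∨ pvRound wt n (pvLoop wt n fuel d) = pvLoop wt n fuel d) := by
  intro fuel
  induction fuel with
  | zero => exact fun d => ⟨0, le_refl _, rfl, Or.inl rfl⟩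
  | succ fuel ih =>
    intro d
    by_cases h : pvRound wt n d = d
    · refine ⟨0, Nat.zero_le _, ?_, Or.inr ?_⟩
      · simp [pvLoop, h]
      · simp [pvLoop, h]
    · obtain ⟨s, hs, heq, hor⟩ := ih (pvRound wt n d)
      refine ⟨s + 1, by omega, ?_, ?_⟩
      · simp only [pvLoop, if_neg h]
        rw [heq, Function.iterate_succ_apply]
      · rcases hor with hsf | hfix
        · exact Or.inl (by omega)
        · refine Or.inr ?_
          simp only [pvLoop, if_neg h]
          exact hfix

-- Nodup lists of naturals below n have length at most n
theorem pv_nodup_length {l : List Nat} {n : Nat} (hnd : l.Nodup) (h : ∀ x ∈ l, x < n) :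
    l.length ≤ n := by
  have h1 : l.toFinset.card = l.length := List.toFinset_card_of_nodup hnd
  have h2 : l.toFinset ⊆ Finset.range n := by
    intro x hx
    rw [List.mem_toFinset] at hx
    rw [Finset.mem_range]
    exact h x hx
  have := Finset.card_le_card h2
  rw [h1, Finset.card_range] at this
  exact this

-- upper bound over duplicate-free walks
def pvNUB (E : Nat → Nat → Option Int) (n : Nat) (m : List (List (Option Int))) : Prop :=
  ∀ i j, i < n → j < n → ∀ p, (∀ x ∈ p, x < n) → (i :: p).Nodup → p.getLastD i = j →
    pvD m i j ≤ pvCost E i p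

theorem pvB_final_nub {E : Nat → Nat → Option Int} {n : Nat} {wt : List (List (Option Int))}
    (hwt : ∀ i j, i < n → j < n → pvGetM wt i j = E i j) :
    pvNUB E n (pvLoop wt n n ((List.range n).map (fun i => (List.range n).map (fun j =>
      if i = j then some 0 else E i j)))) := by
  intro i j hi hj p hall hnd hlast
  obtain ⟨s, hs, heq, hor⟩ := pv_loop_spec wt n n
    ((List.range n).map (fun i => (List.range n).map (fun j => if i = j then some 0 else E i j)))
  have hplen : p.length + 1 ≤ n := by
    have := pv_nodup_length hnd (fun x hx => by
      rcases List.mem_cons.mp hx with rfl | hx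
      · exact hi
      · exact hall x hx)
    simpa using this
  rcases hor with hsn | hfix
  · rw [heq]
    exact (pvB_iter_inv hwt s).2.2 i j hi hj p hall hlast (by omega)
  · have hF : pvLoop wt n n ((List.range n).map (fun i => (List.range n).map (fun j =>
        if i = j then some 0 else E i j)))
        = (pvRound wt n)^[p.length + s] ((List.range n).map (fun i => (List.range n).map (fun j =>
          if i = j then some 0 else E i j))) := by
      rw [Function.iterate_add_apply, ← heq, Function.iterate_fixed hfix]
    rw [hF]
    exact (pvB_iter_inv hwt (p.length + s)).2.2 i j hi hj p hall hlast (by omega)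

theorem pvFW_final_nub (E : Nat → Nat → Option Int) (n : Nat) :
    pvNUB E n ((List.range n).foldl (fun m k => (List.range n).foldl
        (fun m i => (List.range n).foldl (fun m j => pvStep m k i j) m) m)
      ((List.range n).map (fun i => (List.range n).map (fun j => if i = j then some 0 else E i j)))) := by
  intro i j hi hj p hall hnd hlast
  exact (pvFW_inv E n n (le_refl n)).2.2 i j hi hj p hall hnd hlast
    (fun x hx => hall x (List.mem_of_mem_dropLast hx))

-- one-sided comparison: a sound matrix dominates any pvNUB matrix
theorem pv_le_of {E : Nat → Nat → Option Int} (h : Nat → Int)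
    (hpot : ∀ x y, (h y : WithTop Int) ≤ (h x : WithTop Int) + pvT (E x y))
    {n : Nat} {mX mY : List (List (Option Int))}
    (hXu : pvNUB E n mX) (hYs : pvSound E n mY) {i j : Nat} (hi : i < n) (hj : j < n) :
    pvD mX i j ≤ pvD mY i j := by
  cases hY : pvGetM mY i j with
  | none =>
    have : pvD mY i j = ⊤ := by rw [pvD, hY]; rfl
    rw [this]
    exact le_top
  | some v =>
    obtain ⟨p, hp1, hp2, hp3⟩ := hYs i j hi hj (by rw [hY]; simp)
    obtain ⟨q, hq1, hq2, hq3, hq4⟩ := pv_removal E h hpot n p.length i p (le_refl _) hi hp1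
    exact le_trans (le_trans (hXu i j hi hj q hq1 hq2 (by rw [hq3, hp2])) hq4) (le_of_eq hp3)

theorem pvB_final_sound {E : Nat → Nat → Option Int} {n : Nat} {wt : List (List (Option Int))}
    (hwt : ∀ i j, i < n → j < n → pvGetM wt i j = E i j) :
    pvSound E n (pvLoop wt n n ((List.range n).map (fun i => (List.range n).map (fun j =>
      if i = j then some 0 else E i j)))) := by
  obtain ⟨s, hs, heq, hor⟩ := pv_loop_spec wt n n
    ((List.range n).map (fun i => (List.range n).map (fun j => if i = j then some 0 else E i j)))
  rw [heq]
  exact (pvB_iter_inv hwt s).2.1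

theorem pv_entry_eq {E : Nat → Nat → Option Int} (h : Nat → Int)
    (hpot : ∀ x y, (h y : WithTop Int) ≤ (h x : WithTop Int) + pvT (E x y))
    {n : Nat} {mFW mB : List (List (Option Int))}
    (hFWs : pvSound E n mFW) (hFWu : pvNUB E n mFW)
    (hBs : pvSound E n mB) (hBu : pvNUB E n mB)
    {i j : Nat} (hi : i < n) (hj : j < n) : pvGetM mFW i j = pvGetM mB i j :=
  pvT_inj (le_antisymm (pv_le_of h hpot hFWu hBs hi hj) (pv_le_of h hpot hBu hFWs hi hj))

theorem pvGetM_mat_none {n : Nat} (E0 : Nat → Nat → Option Int) (x y : Nat)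
    (h : n ≤ x ∨ n ≤ y) :
    pvGetM ((List.range n).map (fun i => (List.range n).map (fun j => E0 i j))) x y = none := by
  unfold pvGetM
  by_cases hx : x < n
  · rw [pv_getD_map_range _ hx]
    rcases h with h | h
    · omega
    · rw [List.getD_eq_getElem?_getD, List.getElem?_eq_none (by simpa using h)]
      rfl
  · have hrow : ((List.range n).map (fun i => (List.range n).map (fun j => E0 i j))).getD x [] = [] := by
      rw [List.getD_eq_getElem?_getD, List.getElem?_eq_none (by simpa using Nat.le_of_not_lt hx)]
      rfl
    rw [hrow]
    rfl

theorem pv_getD_ne {N : List Int} (hnd : N.Nodup) {i j : Nat}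
    (hi : i < N.length) (hj : j < N.length) (hij : i ≠ j) : N.getD i 0 ≠ N.getD j 0 := by
  intro hc
  apply hij
  rw [List.getD_eq_getElem?_getD, List.getElem?_eq_getElem hi,
      List.getD_eq_getElem?_getD, List.getElem?_eq_getElem hj] at hc
  exact (hnd.getElem_inj_iff).1 (by simpa using hc)

-- the Bellman-Ford potential of Pre_ bounds every one-step cost, on index level
theorem pv_pot_inst {graph : List (Int × List (Int × Int))} (hpre : pvPreNoNegCycle graph = true)
    {N : List Int} (hnd : N.Nodup) :
    ∀ x y, ((pvFinalD graph).getD (N.getD y 0) 0 : WithTop Int)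
      ≤ ((pvFinalD graph).getD (N.getD x 0) 0 : WithTop Int)
        + pvT (pvGetM ((List.range N.length).map (fun i => (List.range N.length).map (fun j =>
            if i = j then none
            else (PySem.Dict.ofList ((PySem.Dict.ofList graph).getD (N.getD i 0) [])).get?
              (N.getD j 0)))) x y) := by
  intro x y
  cases hE : pvGetM ((List.range N.length).map (fun i => (List.range N.length).map (fun j =>
      if i = j then none
      else (PySem.Dict.ofList ((PySem.Dict.ofList graph).getD (N.getD i 0) [])).get?
        (N.getD j 0)))) x y with
  | none =>
    rw [show pvT none = (⊤ : WithTop Int) from rfl, add_top]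
    exact le_top
  | some w =>
    have hx : x < N.length := by
      by_contra hx
      rw [pvGetM_mat_none _ x y (Or.inl (Nat.le_of_not_lt hx))] at hE
      cases hE
    have hy : y < N.length := by
      by_contra hy
      rw [pvGetM_mat_none _ x y (Or.inr (Nat.le_of_not_lt hy))] at hE
      cases hE
    rw [pvGetM_mat _ hx hy] at hE
    have hxy : x ≠ y := by
      intro hcontra
      rw [if_pos hcontra] at hE
      cases hE
    rw [if_neg hxy] at hE
    have hne : N.getD y 0 ≠ N.getD x 0 := pv_getD_ne hnd hy hx (fun hc => hxy hc.symm)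
    have hmem := pv_edge_mem hne hE
    have := pv_pre_prop hpre _ hmem
    rw [show pvT (some w) = ((w : Int) : WithTop Int) from rfl, ← WithTop.coe_add]
    exact WithTop.coe_le_coe.mpr this

theorem pv_main (graph : List (Int × List (Int × Int)))
    (hpre : pvPreNoNegCycle graph = true) :
    floyd_warshall_all_pairs graph = floyd_warshall_all_pairs_alt graph := by
  simp only [floyd_warshall_all_pairs, floyd_warshall_all_pairs_alt]
  rw [pv_nodes_eq0 (PySem.Dict.ofList graph).items]
  dsimp only
  set N := (PySem.Dict.ofList graph).items.foldl
      (fun s p => ((PySem.Dict.ofList p.2).keys).foldl (fun s v => PySem.Set.add s v)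
        (PySem.Set.add s p.1)) PySem.Set.empty with hNdef
  have hnd : N.Nodup := pv_nodes_nodup _ _ List.nodup_nil
  -- A's side: dict state = pvMkD of the Floyd-Warshall matrix
  conv_lhs => rw [← pv_map_range N]
  simp only [List.foldl_map]
  simp only [pv_branch]
  rw [pv_init hnd (fun i j => if N.getD i 0 = N.getD j 0 then some 0
      else (PySem.Dict.ofList ((PySem.Dict.ofList graph).getD (N.getD i 0) [])).get? (N.getD j 0))
      N.length le_rfl]
  rw [pv_init_mk hnd]
  rw [pv_roundK hnd (List.range N.length) (fun x hx => List.mem_range.1 hx) _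
      (pvWf_mat N.length _)]
  rw [pv_final]
  -- name the shared data: one-step cost matrix W and its entry function E
  set W := (List.range N.length).map (fun i => (List.range N.length).map (fun j =>
      if i = j then none
      else (PySem.Dict.ofList ((PySem.Dict.ofList graph).getD (N.getD i 0) [])).get?
        (N.getD j 0))) with hW
  -- A's initial matrix equals B's dist0 entry for entry
  have hm0 : (List.range N.length).map (fun i => (List.range N.length).map (fun j =>
      if i = j then some 0
      else (PySem.Dict.ofList ((PySem.Dict.ofList graph).getD (N.getD i 0) [])).get? (N.getD j 0)))
      = (List.range N.length).map (fun i => (List.range N.length).map (fun j =>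
        if i = j then some 0 else pvGetM W i j)) := by
    apply List.map_congr_left
    intro i hi
    apply List.map_congr_left
    intro j hj
    rw [List.mem_range] at hi hj
    by_cases hij : i = j
    · rw [if_pos hij, if_pos hij]
    · rw [if_neg hij, if_neg hij, hW,
        pvGetM_mat (fun i j => if i = j then none
          else (PySem.Dict.ofList ((PySem.Dict.ofList graph).getD (N.getD i 0) [])).get?
            (N.getD j 0)) hi hj, if_neg hij]
  rw [hm0]
  have hwt : ∀ i j, i < N.length → j < N.length →
      pvGetM W i j = (fun i j => pvGetM W i j) i j := fun i j _ _ => rfl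
  have hpotW : ∀ x y, ((pvFinalD graph).getD (N.getD y 0) 0 : WithTop Int)
      ≤ ((pvFinalD graph).getD (N.getD x 0) 0 : WithTop Int) + pvT (pvGetM W x y) := by
    rw [hW]
    exact pv_pot_inst hpre hnd
  have hentry : ∀ i j, i < N.length → j < N.length →
      pvGetM ((List.range N.length).foldl (fun m k => (List.range N.length).foldl
          (fun m i => (List.range N.length).foldl (fun m j => pvStep m k i j) m) m)
        ((List.range N.length).map (fun i => (List.range N.length).map (fun j =>
          if i = j then some 0 else pvGetM W i j)))) i j
      = pvGetM (pvLoop W N.length N.length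
          ((List.range N.length).map (fun i => (List.range N.length).map (fun j =>
            if i = j then some 0 else pvGetM W i j)))) i j := by
    intro i j hi hj
    exact pv_entry_eq (E := fun i j => pvGetM W i j)
      (fun x => (pvFinalD graph).getD (N.getD x 0) 0) hpotW
      (pvFW_inv (fun i j => pvGetM W i j) N.length N.length le_rfl).2.1
      (pvFW_final_nub (fun i j => pvGetM W i j) N.length)
      (pvB_final_sound hwt) (pvB_final_nub hwt) hi hj
  apply List.flatMap_congr
  intro i hi
  apply List.filterMap_congr
  intro j hj
  rw [List.mem_range] at hi hj
  rw [hentry i j hi hj]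

-- ===== VERDICT (by name: the statement is the Claim_ definition above) =====
theorem floyd_warshall_all_pairs_spec : Claim_equal_floyd_warshall_all_pairs := by
  intro graph _ hpre
  unfold Spec_floyd_warshall_all_pairs
  exact pv_main graph hpre
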